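-- pv_equiv track=rewrite | github.com/Errare-humanum-est/HeteroGen | Algorithms/General/MergeStates.py | _RemoveSingleEntries
-- ===== SOURCE A (Python) =====
-- def _RemoveSingleEntries(statedict):
--     removeguards = []
--     for guard in statedict:
--         if len(statedict[guard]) == 1:
--             removeguards.append(guard)
--
--     for guard in removeguards:
--         del statedict[guard]
--
--     return statedict
-- ===== SOURCE B (Python) =====
-- def _RemoveSingleEntries(statedict):
--     # Drain the dict back-to-front with popitem, keeping survivors on a stack,
--     # then rebuild it in original order by popping the stack.
--     stack = []
--     while statedict:
--         key, value = statedict.popitem()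
--         if len(value) != 1:
--             stack.append((key, value))
--     while stack:
--         key, value = stack.pop()
--         statedict[key] = value
--     return statedict
-- ===== Notes on version B (the rewrite author's own statement) =====
-- stated objective: alternative
-- what changed: B replaces A's collect-keys-then-delete passes by a stack machine: it drains the dict back-to-front with popitem (pushing surviving pairs onto a stack), then rebuilds the same dict in original order by popping the stack, so no key lookup or deletion ever happens.
import Mathlib
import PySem

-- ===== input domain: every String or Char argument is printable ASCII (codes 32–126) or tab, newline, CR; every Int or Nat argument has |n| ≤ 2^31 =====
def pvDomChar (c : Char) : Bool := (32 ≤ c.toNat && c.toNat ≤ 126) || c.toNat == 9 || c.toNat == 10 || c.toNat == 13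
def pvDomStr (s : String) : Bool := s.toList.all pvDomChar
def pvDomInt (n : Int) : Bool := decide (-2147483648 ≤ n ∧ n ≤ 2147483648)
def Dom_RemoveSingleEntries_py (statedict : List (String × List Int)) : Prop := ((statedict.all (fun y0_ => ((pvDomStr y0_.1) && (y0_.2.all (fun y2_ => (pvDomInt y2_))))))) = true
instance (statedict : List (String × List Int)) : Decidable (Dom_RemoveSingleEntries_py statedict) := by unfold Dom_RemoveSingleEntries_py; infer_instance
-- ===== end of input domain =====

-- B replaces A's collect-keys-then-delete passes by a popitem/stack machine
-- (drain the dict back-to-front, rebuild it in order); the equivalence proved is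
-- about the RETURN value (both Pythons mutate the argument dict to the same
-- final contents).

-- ===== PORT A =====
-- statedict[guard]: first-match lookup; the none branch is unreachable (guard comes from the keys)
def pyLookup (sd : List (String × List Int)) (k : String) : List Int :=
  match sd.find? (fun q => q.1 == k) with
  | some q => q.2
  | none => []

def RemoveSingleEntries_py (statedict : List (String × List Int)) : List (String × List Int) :=
  let removeguards : List String :=
    (statedict.map (·.1)).foldl
      (fun acc g => if (pyLookup statedict g).length == 1 then acc ++ [g] else acc) []
  removeguards.foldl (fun d g => d.eraseP (fun p => p.1 == g)) statedict

-- ===== PORT B =====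
-- statedict[key] = value on an association list: overwrite in place, new keys append (Python dict assignment)
def pvDictSet (d : List (String × List Int)) (k : String) (v : List Int) : List (String × List Int) :=
  if d.any (fun p => p.1 == k) then d.map (fun p => if p.1 == k then (k, v) else p)
  else d ++ [(k, v)]

-- first while loop: popitem() drains the dict from the back, survivors pushed on the stack
def pvDrain (d stack : List (String × List Int)) : List (String × List Int) :=
  if h : d = [] then stack
  else
    let kv := d.getLast h
    pvDrain d.dropLast (if kv.2.length == 1 then stack else stack ++ [kv])
termination_by d.length
decreasing_by
  have : 0 < d.length := List.length_pos_iff.mpr h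
  simp [List.length_dropLast]; omega

-- second while loop: stack.pop() reinserts the survivors, restoring original order
def pvRebuild (stack d : List (String × List Int)) : List (String × List Int) :=
  if h : stack = [] then d
  else
    let kv := stack.getLast h
    pvRebuild stack.dropLast (pvDictSet d kv.1 kv.2)
termination_by stack.length
decreasing_by
  have : 0 < stack.length := List.length_pos_iff.mpr h
  simp [List.length_dropLast]; omega

def RemoveSingleEntries_py_alt (statedict : List (String × List Int)) : List (String × List Int) :=
  pvRebuild (pvDrain statedict []) []

-- ===== PRECONDITION & SPEC =====
-- Pre_ requires distinct keys — the invariant every Python dict argument satisfies;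
-- a duplicate-key association list represents no Python input of A.
def Pre_RemoveSingleEntries_py (statedict : List (String × List Int)) : Prop :=
  (statedict.map (·.1)).Nodup

instance (statedict : List (String × List Int)) : Decidable (Pre_RemoveSingleEntries_py statedict) := by
  unfold Pre_RemoveSingleEntries_py; infer_instance

def pvWitness_RemoveSingleEntries_py : (List (String × List Int)) :=
  [("a", [1]), ("b", [1, 2]), ("c", [])]

def Spec_RemoveSingleEntries_py (statedict : List (String × List Int)) (out : List (String × List Int)) : Prop := out = RemoveSingleEntries_py_alt statedict
instance (statedict : List (String × List Int)) (out : List (String × List Int)) : Decidable (Spec_RemoveSingleEntries_py statedict out) := by unfold Spec_RemoveSingleEntries_py; infer_instance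

-- ===== CLAIM (what is proved, stated in full; the proofs are below) =====
def Claim_equal_RemoveSingleEntries_py : Prop := ∀ (statedict : List (String × List Int)), Dom_RemoveSingleEntries_py statedict → Pre_RemoveSingleEntries_py statedict → Spec_RemoveSingleEntries_py statedict (RemoveSingleEntries_py statedict)

-- ===== LEMMAS AND PROOFS =====

-- with distinct keys, two entries sharing a key are the same entry
theorem pv_key_inj (sd : List (String × List Int)) (h : (sd.map (·.1)).Nodup)
    {p q : String × List Int} (hp : p ∈ sd) (hq : q ∈ sd) (hk : p.1 = q.1) : p = q := by
  induction sd with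
  | nil => cases hp
  | cons x xs ih =>
    simp only [List.map_cons, List.nodup_cons] at h
    rcases List.mem_cons.mp hp with rfl | hp' <;> rcases List.mem_cons.mp hq with rfl | hq'
    · rfl
    · exact absurd (hk ▸ List.mem_map_of_mem hq') h.1
    · exact absurd (hk ▸ List.mem_map_of_mem hp') h.1
    · exact ih h.2 hp' hq'

theorem pv_lookup_self (sd : List (String × List Int)) (h : (sd.map (·.1)).Nodup)
    {p : String × List Int} (hp : p ∈ sd) : pyLookup sd p.1 = p.2 := by
  induction sd with
  | nil => cases hp
  | cons x xs ih =>
    by_cases hx : x.1 = p.1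
    · have hxp : x = p := pv_key_inj (x :: xs) h List.mem_cons_self hp hx
      subst hxp
      simp [pyLookup]
    · simp only [List.map_cons, List.nodup_cons] at h
      rcases List.mem_cons.mp hp with rfl | hp'
      · exact absurd rfl hx
      · have hne : (x.1 == p.1) = false := by simp [hx]
        simpa [pyLookup, hne] using ih h.2 hp'

-- erasing a key from a distinct-key list is filtering it out
theorem pv_eraseP_eq_filter (sd : List (String × List Int)) (g : String)
    (h : (sd.map (·.1)).Nodup) :
    sd.eraseP (fun p => p.1 == g) = sd.filter (fun p => !(p.1 == g)) := by
  induction sd with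
  | nil => rfl
  | cons x xs ih =>
    simp only [List.map_cons, List.nodup_cons] at h
    by_cases hx : x.1 = g
    · have : xs.filter (fun p => !(p.1 == g)) = xs := by
        apply List.filter_eq_self.mpr
        intro p hp
        simp only [Bool.not_eq_eq_eq_not, Bool.not_true, beq_eq_false_iff_ne]
        intro hpg
        exact h.1 ((hx ▸ hpg : p.1 = x.1) ▸ List.mem_map_of_mem hp)
      simp [hx, this]
    · simp [hx, ih h.2]

theorem pv_foldl_erase (ks : List String) (sd : List (String × List Int))
    (h : (sd.map (·.1)).Nodup) :
    ks.foldl (fun d g => d.eraseP (fun p => p.1 == g)) sd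
      = sd.filter (fun p => !(ks.contains p.1)) := by
  induction ks generalizing sd with
  | nil => simp
  | cons g ks ih =>
    have h1 : (sd.eraseP (fun p => p.1 == g)) = sd.filter (fun p => !(p.1 == g)) :=
      pv_eraseP_eq_filter sd g h
    have hs : (sd.filter (fun p => !(p.1 == g))).Sublist sd := List.filter_sublist
    have h2 : ((sd.filter (fun p => !(p.1 == g))).map (·.1)).Nodup :=
      (hs.map (fun p => p.1)).nodup h
    rw [List.foldl_cons, h1, ih _ h2, List.filter_filter]
    apply List.filter_congr
    intro p _
    simp only [List.contains_cons, Bool.not_or]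
    rw [Bool.and_comm]

-- A returns the entries whose value is not a singleton, in order
theorem pv_A_eq_filter (sd : List (String × List Int)) (h : (sd.map (·.1)).Nodup) :
    RemoveSingleEntries_py sd = sd.filter (fun p => !(p.2.length == 1)) := by
  unfold RemoveSingleEntries_py
  rw [PySem.List.foldl_append_if_eq_filter, List.nil_append]
  have hrg : (sd.map (·.1)).filter (fun g => (pyLookup sd g).length == 1)
      = (sd.filter (fun p => p.2.length == 1)).map (·.1) := by
    rw [List.filter_map]
    congr 1
    apply List.filter_congr
    intro p hp
    show ((pyLookup sd p.1).length == 1) = (p.2.length == 1)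
    rw [pv_lookup_self sd h hp]
  rw [hrg, pv_foldl_erase _ _ h]
  apply List.filter_congr
  intro p hp
  have hc : (((sd.filter (fun q => q.2.length == 1)).map (·.1)).contains p.1)
      = (p.2.length == 1) := by
    by_cases hl : p.2.length = 1
    · have hmem : p.1 ∈ (sd.filter (fun q => q.2.length == 1)).map (·.1) :=
        List.mem_map_of_mem (List.mem_filter.mpr ⟨hp, by simp [hl]⟩)
      simp [hmem, hl]
    · have hmem : p.1 ∉ (sd.filter (fun q => q.2.length == 1)).map (·.1) := by
        intro hmem
        rcases List.mem_map.mp hmem with ⟨q, hq, hqk⟩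
        rcases List.mem_filter.mp hq with ⟨hq', hq1⟩
        exact hl (by
          rw [pv_key_inj sd h hp hq' hqk.symm]
          simpa using hq1)
      simp [hmem, hl]
  rw [hc]

-- the drain loop stacks the survivors in reverse order
theorem pv_drain_eq (sd : List (String × List Int)) :
    ∀ stack, pvDrain sd stack = stack ++ (sd.filter (fun p => !(p.2.length == 1))).reverse := by
  induction sd using List.reverseRecOn with
  | nil => intro stack; rw [pvDrain]; simp
  | append_singleton init x ih =>
    intro stack
    rw [pvDrain]
    have hne : init ++ [x] ≠ [] := by simp
    simp only [hne, dite_false, List.getLast_append, List.dropLast_concat]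
    by_cases hx : x.2.length = 1
    · simp [hx, ih, List.filter_append]
    · have hx' : (x.2.length == 1) = false := by simp [hx]
      simp [hx', ih, List.filter_append]

-- inserting a fresh key appends
theorem pv_set_fresh (d : List (String × List Int)) (k : String) (v : List Int)
    (h : ∀ p ∈ d, p.1 ≠ k) : pvDictSet d k v = d ++ [(k, v)] := by
  unfold pvDictSet
  have : d.any (fun p => p.1 == k) = false := by
    simp only [List.any_eq_false]
    intro p hp
    simpa using h p hp
  simp [this]

-- the rebuild loop, fed a stack whose keys are distinct and absent from d, appends the reversed stack
theorem pv_rebuild_eq (stack : List (String × List Int)) :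
    ∀ d, (stack.map (·.1)).Nodup → (∀ p ∈ stack, ∀ q ∈ d, q.1 ≠ p.1) →
      pvRebuild stack d = d ++ stack.reverse := by
  induction stack using List.reverseRecOn with
  | nil => intro d _ _; rw [pvRebuild]; simp
  | append_singleton init x ih =>
    intro d hnd hdisj
    rw [pvRebuild]
    have hne : init ++ [x] ≠ [] := by simp
    simp only [hne, dite_false, List.getLast_append, List.isEmpty_cons, List.getLast_singleton,
      List.dropLast_concat, Bool.false_eq_true, dite_false]
    rw [pv_set_fresh d x.1 x.2 (fun p hp => hdisj x (by simp) p hp)]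
    rw [List.map_append, List.nodup_append] at hnd
    rw [ih (d ++ [(x.1, x.2)]) hnd.1]
    · simp
    · intro p hp q hq
      rcases List.mem_append.mp hq with hq | hq
      · exact hdisj p (List.mem_append_left _ hp) q hq
      · simp only [List.mem_singleton] at hq
        subst hq
        intro hcontra
        have h1 : p.1 ∈ init.map (·.1) := List.mem_map_of_mem hp
        have h2 : x.1 ∈ [x].map (·.1) := by simp
        exact absurd hcontra.symm (hnd.2.2 _ h1 _ h2)

-- ===== VERDICT (by name: the statement is the Claim_ definition above) =====
theorem RemoveSingleEntries_py_spec : Claim_equal_RemoveSingleEntries_py := by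
  intro sd _ hpre
  unfold Spec_RemoveSingleEntries_py RemoveSingleEntries_py_alt
  rw [pv_A_eq_filter sd hpre, pv_drain_eq sd [], List.nil_append]
  have hnd : (((sd.filter (fun p => !(p.2.length == 1))).reverse).map (·.1)).Nodup := by
    rw [List.map_reverse]
    exact (List.nodup_reverse).mpr ((List.filter_sublist.map _).nodup hpre)
  rw [pv_rebuild_eq _ [] hnd (by intro p _ q hq; cases hq)]
  simp
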